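-- pv_equiv track=rewrite | github.com/gyeomh/LEGO-EVAL | preprocess/adj_functions.py | get_door_list
-- ===== SOURCE A (Python) =====
-- def get_door_list(scene: dict, room_list: list) -> dict:
--
--
--     output = {}
--     for room in room_list:
--         output[room] = []
--     for door in scene.get("doors", []):
--         if (door["room0"] in room_list):
--             output[door["room0"]].append(door["id"])
--         if door["room1"] in room_list:
--             output[door["room1"]].append(door["id"])
--
--     return output
-- ===== SOURCE B (Python) =====
-- def get_door_list(scene: dict, room_list: list) -> dict:
--     return {
--         room: [d["id"]
--                for d in scene.get("doors", [])
--                for f in ("room0", "room1")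
--                if d[f] == room]
--         for room in room_list
--     }
-- ===== Notes on version B (the rewrite author's own statement) =====
-- stated objective: simpler
-- what changed: A makes one indexed pass over the doors, appending each door id into a pre-initialized per-room dict; B inverts the traversal into a dict comprehension keyed over room_list whose value rescans the doors (over both fields room0/room1) per room.
import Mathlib
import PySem

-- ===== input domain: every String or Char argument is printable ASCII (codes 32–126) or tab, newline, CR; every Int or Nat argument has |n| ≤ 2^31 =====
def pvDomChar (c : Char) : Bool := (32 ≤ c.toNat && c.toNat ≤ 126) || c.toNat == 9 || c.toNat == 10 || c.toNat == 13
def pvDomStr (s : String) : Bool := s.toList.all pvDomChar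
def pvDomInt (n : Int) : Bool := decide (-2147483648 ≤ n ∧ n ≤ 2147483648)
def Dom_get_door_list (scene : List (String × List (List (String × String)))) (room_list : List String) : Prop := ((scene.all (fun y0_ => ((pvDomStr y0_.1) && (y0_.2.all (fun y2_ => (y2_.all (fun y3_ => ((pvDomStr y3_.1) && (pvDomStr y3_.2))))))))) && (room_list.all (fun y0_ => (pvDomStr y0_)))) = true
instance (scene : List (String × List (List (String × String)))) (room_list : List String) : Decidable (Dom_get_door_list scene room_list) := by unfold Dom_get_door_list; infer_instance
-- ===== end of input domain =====

-- B replaces A's single appending pass over the doors by a dict comprehension over room_list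
-- that rescans the doors per room (objective: simpler).


-- ===== PORT A =====
-- output = {}; for room in room_list: output[room] = []
def pvInit (room_list : List String) : PySem.Dict String (List String) :=
  room_list.foldl (fun d room => d.insert room []) PySem.Dict.empty

-- the body of A's second loop; door["k"] is ported as getD _ "" — inside Pre_ the key is
-- always present, so the "" default is never the value actually used, and
-- output[k].append(x) (key present by the guard) is modify k [] (· ++ [x])
def pvAStep (room_list : List String) (out : PySem.Dict String (List String))
    (door : List (String × String)) : PySem.Dict String (List String) :=
  let dd := PySem.Dict.mk door
  let out := if room_list.contains (dd.getD "room0" "")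
    then out.modify (dd.getD "room0" "") [] (fun l => l ++ [dd.getD "id" ""]) else out
  if room_list.contains (dd.getD "room1" "")
    then out.modify (dd.getD "room1" "") [] (fun l => l ++ [dd.getD "id" ""]) else out

def get_door_list (scene : List (String × List (List (String × String)))) (room_list : List String) : List (String × List String) :=
  let doors : List (List (String × String)) := (PySem.Dict.mk scene).getD "doors" []
  (doors.foldl (pvAStep room_list) (pvInit room_list)).items

-- ===== PORT B =====
-- [d["id"] for d in doors for f in ("room0","room1") if d[f] == room]
def pvCollect (doors : List (List (String × String))) (room : String) : List String :=
  doors.flatMap (fun door =>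
    ((["room0", "room1"].filter (fun f => (PySem.Dict.mk door).getD f "" == room)).map
      (fun _ => (PySem.Dict.mk door).getD "id" "")))

def get_door_list_alt (scene : List (String × List (List (String × String)))) (room_list : List String) : List (String × List String) :=
  let doors : List (List (String × String)) := (PySem.Dict.mk scene).getD "doors" []
  (room_list.foldl (fun d room => d.insert room (pvCollect doors room)) PySem.Dict.empty).items

-- ===== PRECONDITION & SPEC =====
-- Pre_ excludes exactly the inputs where Python A raises KeyError: a door missing "room0" or
-- "room1", or a door whose matched room lacks "id".
def Pre_get_door_list (scene : List (String × List (List (String × String)))) (room_list : List String) : Prop :=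
  ∀ door ∈ (PySem.Dict.mk scene).getD "doors" ([] : List (List (String × String))),
    (PySem.Dict.mk door).contains "room0" = true ∧
    (PySem.Dict.mk door).contains "room1" = true ∧
    (((PySem.Dict.mk door).getD "room0" "" ∈ room_list ∨
      (PySem.Dict.mk door).getD "room1" "" ∈ room_list) →
      (PySem.Dict.mk door).contains "id" = true)
instance (scene : List (String × List (List (String × String)))) (room_list : List String) : Decidable (Pre_get_door_list scene room_list) := by unfold Pre_get_door_list; infer_instance

def pvWitness_get_door_list : (List (String × List (List (String × String)))) × List String :=
  ([("doors", [[("room0", "a"), ("room1", "b"), ("id", "d1")]])], ["a", "c"])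

def Spec_get_door_list (scene : List (String × List (List (String × String)))) (room_list : List String) (out : List (String × List String)) : Prop := out = get_door_list_alt scene room_list
instance (scene : List (String × List (List (String × String)))) (room_list : List String) (out : List (String × List String)) : Decidable (Spec_get_door_list scene room_list out) := by unfold Spec_get_door_list; infer_instance

-- ===== CLAIM (what is proved, stated in full; the proofs are below) =====
def Claim_equal_get_door_list : Prop := ∀ (scene : List (String × List (List (String × String)))) (room_list : List String), Dom_get_door_list scene room_list → Pre_get_door_list scene room_list → Spec_get_door_list scene room_list (get_door_list scene room_list)


-- ===== LEMMAS AND PROOFS =====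

-- value at k of a fold inserting f r at each r
lemma getD_foldl_insertF (f : String → List String) (k : String) :
    ∀ (rl : List String) (d : PySem.Dict String (List String)),
    (rl.foldl (fun d r => d.insert r (f r)) d).getD k [] = if k ∈ rl then f k else d.getD k [] := by
  intro rl
  induction rl with
  | nil => intro d; simp
  | cons r rl ih =>
    intro d
    simp only [List.foldl_cons, ih, PySem.Dict.getD_insert, List.mem_cons]
    by_cases hk : k ∈ rl <;> by_cases hr : k = r <;> simp [hk, hr]

lemma pvCollect_single (door : List (String × String)) (k : String) :
    pvCollect [door] k =
      (if (PySem.Dict.mk door).getD "room0" "" = k then [(PySem.Dict.mk door).getD "id" ""] else []) ++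
      (if (PySem.Dict.mk door).getD "room1" "" = k then [(PySem.Dict.mk door).getD "id" ""] else []) := by
  cases h0 : ((PySem.Dict.mk door).getD "room0" "" == k) <;>
    cases h1 : ((PySem.Dict.mk door).getD "room1" "" == k) <;>
    simp [pvCollect, List.filter, h0, h1] <;>
    simp_all

lemma getD_modify_append (d : PySem.Dict String (List String)) (r i k : String) :
    (d.modify r [] (fun l => l ++ [i])).getD k [] = d.getD k [] ++ (if r = k then [i] else []) := by
  rw [PySem.Dict.getD_modify]
  by_cases e : r = k
  · simp [e]
  · simp [e, Ne.symm e]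

lemma keys_modify_of_contains (d : PySem.Dict String (List String)) (r : String) (i : String)
    (h : d.contains r = true) : (d.modify r [] (fun l => l ++ [i])).keys = d.keys := by
  rw [PySem.Dict.keys_modify, PySem.Dict.keys_insert_of_contains]
  exact h

lemma pvAStep_getD (rl : List String) (door : List (String × String))
    (d : PySem.Dict String (List String)) (k : String) :
    (pvAStep rl d door).getD k [] = d.getD k [] ++ (if k ∈ rl then pvCollect [door] k else []) := by
  have hmem : ∀ s : String, (rl.contains s = true) = (s ∈ rl) := by intro s; simp
  unfold pvAStep
  rw [pvCollect_single]
  simp only [hmem]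
  by_cases h0 : (PySem.Dict.mk door).getD "room0" "" ∈ rl <;>
    by_cases h1 : (PySem.Dict.mk door).getD "room1" "" ∈ rl <;>
    simp only [h0, h1, if_true, if_false, getD_modify_append] <;>
    by_cases hk : k ∈ rl <;>
    by_cases e0 : (PySem.Dict.mk door).getD "room0" "" = k <;>
    by_cases e1 : (PySem.Dict.mk door).getD "room1" "" = k <;>
    simp_all

lemma pvAStep_keys (rl : List String) (door : List (String × String))
    (d : PySem.Dict String (List String)) (hinv : ∀ r, d.contains r = true ↔ r ∈ rl) :
    (pvAStep rl d door).keys = d.keys := by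
  have hmem : ∀ s : String, (rl.contains s = true) = (s ∈ rl) := by intro s; simp
  unfold pvAStep
  simp only [hmem]
  by_cases h0 : (PySem.Dict.mk door).getD "room0" "" ∈ rl <;>
    by_cases h1 : (PySem.Dict.mk door).getD "room1" "" ∈ rl <;>
    simp only [h0, h1, if_true, if_false]
  · rw [keys_modify_of_contains _ _ _ (by rw [PySem.Dict.contains_modify]; simp [(hinv _).mpr h1]),
        keys_modify_of_contains _ _ _ ((hinv _).mpr h0)]
  · rw [keys_modify_of_contains _ _ _ ((hinv _).mpr h0)]
  · rw [keys_modify_of_contains _ _ _ ((hinv _).mpr h1)]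

lemma doorsFold_spec (rl : List String) :
    ∀ (ds : List (List (String × String))) (d : PySem.Dict String (List String)),
    (∀ r, d.contains r = true ↔ r ∈ rl) →
    ((ds.foldl (pvAStep rl) d).keys = d.keys ∧
     ∀ k, (ds.foldl (pvAStep rl) d).getD k [] = d.getD k [] ++ (if k ∈ rl then pvCollect ds k else [])) := by
  intro ds
  induction ds with
  | nil => intro d hinv; constructor; · rfl
           · intro k; by_cases hk : k ∈ rl <;> simp [hk, pvCollect]
  | cons door ds ih =>
    intro d hinv
    have hkeys := pvAStep_keys rl door d hinv
    have hinv' : ∀ r, (pvAStep rl d door).contains r = true ↔ r ∈ rl := by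
      intro r
      rw [PySem.Dict.contains_iff_mem_keys, hkeys, ← PySem.Dict.contains_iff_mem_keys, hinv]
    obtain ⟨ihk, ihg⟩ := ih (pvAStep rl d door) hinv'
    constructor
    · simpa [hkeys] using ihk
    · intro k
      rw [List.foldl_cons, ihg k, pvAStep_getD rl door d k]
      have hsplit : pvCollect (door :: ds) k = pvCollect [door] k ++ pvCollect ds k := by
        simp [pvCollect]
      by_cases hk : k ∈ rl <;> simp [hk, hsplit]

lemma pvInit_keys (rl : List String) : (pvInit rl).keys = PySem.Set.ofList rl := by
  unfold pvInit
  rw [PySem.Dict.keys_foldl_insert]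
  simp [PySem.Set.update_nil_left]

lemma pvInit_contains (rl : List String) (r : String) : (pvInit rl).contains r = true ↔ r ∈ rl := by
  rw [PySem.Dict.contains_iff_mem_keys, pvInit_keys, PySem.Set.mem_ofList]

lemma pvInit_getD (rl : List String) (k : String) : (pvInit rl).getD k [] = [] := by
  unfold pvInit
  rw [getD_foldl_insertF (fun _ => []) k rl PySem.Dict.empty]
  by_cases hk : k ∈ rl <;> simp [hk]

-- ===== VERDICT (by name: the statement is the Claim_ definition above) =====
theorem get_door_list_spec : Claim_equal_get_door_list := by
  intro scene room_list _ _
  unfold Spec_get_door_list get_door_list get_door_list_alt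
  set doors := (PySem.Dict.mk scene).getD "doors" ([] : List (List (String × String))) with hd
  obtain ⟨hkeys, hgetD⟩ := doorsFold_spec room_list doors (pvInit room_list) (pvInit_contains room_list)
  set A := doors.foldl (pvAStep room_list) (pvInit room_list) with hA
  set B := room_list.foldl (fun d room => d.insert room (pvCollect doors room)) PySem.Dict.empty with hB
  have hAkeys : A.keys = PySem.Set.ofList room_list := by rw [hkeys, pvInit_keys]
  have hBkeys : B.keys = PySem.Set.ofList room_list := by
    rw [hB, PySem.Dict.keys_foldl_insert]; simp [PySem.Set.update_nil_left]
  have hAnd : A.keys.Nodup := by rw [hAkeys]; exact PySem.Set.nodup_ofList room_list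
  have hBnd : B.keys.Nodup := by rw [hBkeys]; exact PySem.Set.nodup_ofList room_list
  rw [PySem.Dict.items_eq_map_keys A hAnd [], PySem.Dict.items_eq_map_keys B hBnd [],
    hAkeys, hBkeys]
  apply List.map_congr_left
  intro k hk
  have hkrl : k ∈ room_list := (PySem.Set.mem_ofList room_list k).mp hk
  rw [hgetD k, pvInit_getD, hB, getD_foldl_insertF (pvCollect doors) k room_list PySem.Dict.empty]
  simp [hkrl]
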